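-- pv_equiv track=rewrite | github.com/JavierGuillamon/TFG | filtado_colavorativo_jaccard.py | clicks
-- ===== SOURCE A (Python) =====
-- def clicks(playlist_test, songs_recommended):
--     cont=0
--     p_set = set(playlist_test)
--     for i in range(50):
--         for j in songs_recommended[cont:cont+10]:
--             if j in p_set:
--                 return i
--         cont += 10
--     return 51
-- ===== SOURCE B (Python) =====
-- def clicks(playlist_test, songs_recommended):
--     p_set = set(playlist_test)
--     for idx, song in enumerate(songs_recommended[:500]):
--         if song in p_set:
--             return idx // 10
--     return 51
-- ===== Notes on version B (the rewrite author's own statement) =====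
-- stated objective: simpler
-- what changed: Replaced the nested block loop (50 iterations each slicing a fresh 10-song window) with a single flat scan of the first 500 recommendations, mapping the hit position to its block via idx // 10.
import Mathlib
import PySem

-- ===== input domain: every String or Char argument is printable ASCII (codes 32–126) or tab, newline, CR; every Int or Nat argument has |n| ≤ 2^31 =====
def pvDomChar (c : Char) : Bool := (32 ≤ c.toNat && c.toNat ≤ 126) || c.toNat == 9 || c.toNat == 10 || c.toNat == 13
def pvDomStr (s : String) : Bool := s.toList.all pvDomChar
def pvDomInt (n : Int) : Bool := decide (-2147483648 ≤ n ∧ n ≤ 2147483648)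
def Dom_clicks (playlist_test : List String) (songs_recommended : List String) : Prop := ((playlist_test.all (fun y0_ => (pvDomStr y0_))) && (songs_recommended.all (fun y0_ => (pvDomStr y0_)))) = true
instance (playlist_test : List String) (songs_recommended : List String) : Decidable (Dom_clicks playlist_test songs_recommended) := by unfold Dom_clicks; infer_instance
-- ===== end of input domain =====

-- B replaces A's 50-iteration block loop (a fresh 10-song slice per block) with a single
-- flat scan of the first 500 recommendations, mapping a hit at idx to block idx // 10.

-- ===== PORT A =====
-- 'for i in range(50): for j in songs[cont:cont+10]: if j in p_set: return i; cont += 10; return 51'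
def clicksA_go (p_set : PySem.Set String) (songs : List String) : List Int → Int → Int
  | [], _ => 51
  | i :: rest, cont =>
    if (PySem.List.slice songs (some cont) (some (cont + 10))).any
        (fun j => PySem.Set.contains p_set j) then i
    else clicksA_go p_set songs rest (cont + 10)

def clicks (playlist_test : List String) (songs_recommended : List String) : Int :=
  clicksA_go (PySem.Set.ofList playlist_test) songs_recommended (PySem.List.pyRange 0 50 1) 0

-- ===== PORT B =====
-- 'for idx, song in enumerate(songs_recommended[:500]): if song in p_set: return idx // 10; return 51'
def clicksB_go (p_set : PySem.Set String) : List (Int × String) → Int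
  | [] => 51
  | (idx, song) :: rest =>
    if PySem.Set.contains p_set song then PySem.Int.floordiv idx 10
    else clicksB_go p_set rest

def clicks_alt (playlist_test : List String) (songs_recommended : List String) : Int :=
  clicksB_go (PySem.Set.ofList playlist_test)
    (PySem.List.enumerate (PySem.List.slice songs_recommended none (some 500)) 0)

-- ===== PRECONDITION & SPEC =====
def Spec_clicks (playlist_test : List String) (songs_recommended : List String) (out : Int) : Prop := out = clicks_alt playlist_test songs_recommended
instance (playlist_test : List String) (songs_recommended : List String) (out : Int) : Decidable (Spec_clicks playlist_test songs_recommended out) := by unfold Spec_clicks; infer_instance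

-- ===== CLAIM (what is proved, stated in full; the proofs are below) =====
def Claim_equal_clicks : Prop := ∀ (playlist_test : List String) (songs_recommended : List String), Dom_clicks playlist_test songs_recommended → Spec_clicks playlist_test songs_recommended (clicks playlist_test songs_recommended)

-- ===== LEMMAS AND PROOFS =====

-- common form of both loops: scan k blocks of 10 of t, block counter i
def blockScan (p_set : PySem.Set String) : Nat → List String → Nat → Int
  | 0, _, _ => 51
  | k+1, t, i =>
    if (t.take 10).any (fun j => PySem.Set.contains p_set j) then (i : Int)
    else blockScan p_set k (t.drop 10) (i + 1)

theorem blockScan_nil (ps : PySem.Set String) (k i : Nat) : blockScan ps k [] i = 51 := by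
  induction k generalizing i with
  | zero => rfl
  | succ k ih => simp [blockScan, ih]

theorem clicksA_go_eq_blockScan (ps : PySem.Set String) (songs : List String)
    (k i c : Nat) :
    clicksA_go ps songs (PySem.List.pyRange (i : Int) ((i : Int) + (k : Int)) 1) (c : Int)
      = blockScan ps k (songs.drop c) i := by
  induction k generalizing i c with
  | zero =>
    rw [PySem.List.pyRange_one_eq_nil (by simp)]
    rfl
  | succ k ih =>
    rw [PySem.List.pyRange_one_cons (by push_cast; omega)]
    have hsl : PySem.List.slice songs (some (c : Int)) (some ((c : Int) + 10))
        = (songs.drop c).take 10 := by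
      have := PySem.List.slice_natCast_add songs c 10
      simpa using this
    simp only [clicksA_go, blockScan, hsl]
    by_cases h : ((songs.drop c).take 10).any (fun j => PySem.Set.contains ps j) = true
    · rw [if_pos h, if_pos h]
    · rw [if_neg h, if_neg h]
      have hc : (c : Int) + 10 = ((c + 10 : Nat) : Int) := by push_cast; ring
      have hr : (i : Int) + 1 = ((i + 1 : Nat) : Int) := by push_cast; ring
      have hb : (i : Int) + ((k + 1 : Nat) : Int) = ((i + 1 : Nat) : Int) + (k : Int) := by
        push_cast; ring
      rw [hc, hr, hb, ih (i + 1) (c + 10), List.drop_drop]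

theorem clicksB_go_block (ps : PySem.Set String) (l : List String)
    (rest : List (Int × String)) (i : Nat) :
    ∀ (j : Nat), l.length + j ≤ 10 →
    clicksB_go ps (PySem.List.enumerate l ((10 * i + j : Nat) : Int) ++ rest)
      = if l.any (fun j => PySem.Set.contains ps j) then (i : Int) else clicksB_go ps rest := by
  induction l with
  | nil => intro j _; simp [PySem.List.enumerate_nil, List.any_nil]
  | cons s l' ih =>
    intro j hj
    rw [PySem.List.enumerate_cons, List.cons_append]
    simp only [clicksB_go, List.any_cons]
    by_cases h : PySem.Set.contains ps s = true
    · rw [if_pos h]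
      have hdiv : PySem.Int.floordiv ((10 * i + j : Nat) : Int) 10 = (i : Int) := by
        have hx := PySem.Int.floordiv_natCast (10 * i + j) 10
        have hij : (10 * i + j) / 10 = i := by simp at hj; omega
        rw [hij] at hx
        exact_mod_cast hx
      have hcond : (ps.contains s || l'.any fun j => ps.contains j) = true := by
        rw [h, Bool.true_or]
      rw [if_pos hcond]
      exact hdiv
    · have h' : PySem.Set.contains ps s = false := by simpa using h
      rw [if_neg h]
      have hs : ((10 * i + j : Nat) : Int) + 1 = ((10 * i + (j + 1) : Nat) : Int) := by
        push_cast; ring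
      rw [hs, ih (j + 1) (by simp at hj ⊢; omega)]
      simp only [h', Bool.false_or]

theorem clicksB_go_eq_blockScan (ps : PySem.Set String) (k : Nat) :
    ∀ (t : List String) (i : Nat),
    clicksB_go ps (PySem.List.enumerate (t.take (10 * k)) ((10 * i : Nat) : Int))
      = blockScan ps k t i := by
  induction k with
  | zero => intro t i; simp [PySem.List.enumerate_nil, clicksB_go, blockScan]
  | succ k ih =>
    intro t i
    have hsplit : t.take (10 * (k + 1)) = t.take 10 ++ (t.drop 10).take (10 * k) := by
      rw [show 10 * (k + 1) = 10 + 10 * k by ring, List.take_add]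
    rw [hsplit, PySem.List.enumerate_append,
      show ((10 * i : Nat) : Int) = ((10 * i + 0 : Nat) : Int) by norm_num,
      clicksB_go_block ps (t.take 10) _ i 0 (by simp)]
    simp only [blockScan]
    by_cases h : ((t.take 10).any (fun j => PySem.Set.contains ps j)) = true
    · rw [if_pos h, if_pos h]
    · rw [if_neg h, if_neg h]
      by_cases hlen : 10 ≤ t.length
      · have harg : ((10 * i + 0 : Nat) : Int) + (((t.take 10).length : Nat) : Int)
            = ((10 * (i + 1) : Nat) : Int) := by
          rw [List.length_take, Nat.min_eq_left hlen]; push_cast; ring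
        rw [harg, ih (t.drop 10) (i + 1)]
      · have hdrop : t.drop 10 = [] := List.drop_eq_nil_of_le (by omega)
        rw [hdrop]
        simp only [List.take_nil, PySem.List.enumerate_nil, clicksB_go, blockScan_nil]

-- ===== VERDICT (by name: the statement is the Claim_ definition above) =====
theorem clicks_spec : Claim_equal_clicks := by
  intro pt songs _
  show clicks pt songs = clicks_alt pt songs
  unfold clicks clicks_alt
  have hA : clicksA_go (PySem.Set.ofList pt) songs (PySem.List.pyRange 0 50 1) 0
      = blockScan (PySem.Set.ofList pt) 50 songs 0 := by
    have h := clicksA_go_eq_blockScan (PySem.Set.ofList pt) songs 50 0 0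
    norm_num at h
    exact h
  have hsl : PySem.List.slice songs none (some 500) = songs.take 500 := by
    have := PySem.List.slice_to_natCast songs 500
    simpa using this
  have hB : clicksB_go (PySem.Set.ofList pt)
        (PySem.List.enumerate (songs.take 500) 0)
      = blockScan (PySem.Set.ofList pt) 50 songs 0 := by
    have h := clicksB_go_eq_blockScan (PySem.Set.ofList pt) 50 songs 0
    norm_num at h
    exact h
  rw [hA, hsl, hB]
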